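-- pv_equiv track=rewrite | github.com/mlmarius/maximize | solutii.py | maximizeRatings
-- ===== SOURCE A (Python) =====
-- import itertools
--
-- def maximizeRatings(ratings):
--
--     # generez toate posibilele combinatii de selectii pentru lungimea lui ratings
--     # ex: "0100100" ....
--     # momentan le pastrez ca stringuri ca sa fie mai usor la pasul urmator
--     combos = ["".join(seq) for seq in itertools.product("01", repeat=len(ratings))]
--
--     # filtram optiunile si rejectam toate situatiile in care avem doua numere
--     # rejectate in mod secvential
--     # deasemenea, tot aici convertim din stringuri in liste de integer-uri astfel
--     # incat sa ajungem la [0,1,0,1,1...]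
--     combos = [map(int, list(c)) for c in combos if '00' not in c]
--
--     # am ramas doar cu optiunile valide conform criteriului
--     # acum combin array-ul de intrare cu toate optiunile valide ramase
--     # urmeaza sa folosesc fiecare optiune ca o masca pentru array-ul de intrare
--     options = [zip(combo, ratings) for combo in combos]
--
--     # pentru claritate
--     # separam sumarea termenilor intr-o
--     # functie separata
--     def computeOutcome(option):
--         # Calculam suma numerelor selectate
--         items = [i[0]*i[1] for i in option]
--         return sum(items)
--
--     # calculam sumele generate de toate optiunile valide
--     outcomes = [computeOutcome(option) for option in options]
--
--     # voilla:
--     return max(outcomes)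
-- ===== SOURCE B (Python) =====
-- def maximizeRatings(ratings):
--     # O(n) DP: take = best sum of a valid selection of the prefix whose last
--     # element is selected; skip = best whose last element is skipped
--     # (no two consecutive skips allowed).
--     take, skip = 0, 0
--     for r in ratings:
--         take, skip = max(take, skip) + r, take
--     return max(take, skip)
-- ===== Notes on version B (the rewrite author's own statement) =====
-- stated objective: faster
-- what changed: B replaces A's enumeration of all 2^n masks (generate, filter out '00', zip and sum each) with a single left-to-right DP pass tracking the best sum with the last element taken vs skipped.
import Mathlib
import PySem

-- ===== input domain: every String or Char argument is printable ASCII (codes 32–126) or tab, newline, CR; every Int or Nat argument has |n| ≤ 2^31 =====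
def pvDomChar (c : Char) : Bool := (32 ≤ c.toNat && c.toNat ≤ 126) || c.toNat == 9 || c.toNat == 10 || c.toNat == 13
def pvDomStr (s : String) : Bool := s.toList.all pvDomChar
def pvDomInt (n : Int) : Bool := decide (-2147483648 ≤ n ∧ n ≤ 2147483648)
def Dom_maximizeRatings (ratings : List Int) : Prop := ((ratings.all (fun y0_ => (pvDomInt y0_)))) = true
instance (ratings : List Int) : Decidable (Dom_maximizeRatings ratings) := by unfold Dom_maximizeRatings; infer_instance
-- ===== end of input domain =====

-- B replaces A's exponential enumeration of all no-"00" masks with a one-pass O(n) DP; equal return value proved for all inputs.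

-- ===== PORT A =====
-- itertools.product("01", repeat=n): leftmost position varies slowest
def pyProduct01 : Nat → List (List Char)
  | 0 => [[]]
  | n+1 => ("01".toList).flatMap (fun c => (pyProduct01 n).map (fun r => c :: r))

-- int(c) for a single character c (here always '0' or '1', so ofChars? always returns; .getD 0 is never the result)
def pyIntChar (c : Char) : Int := (PySem.Int.ofChars? [c]).getD 0

def maximizeRatings (ratings : List Int) : Int :=
  -- combos = all 0/1 strings of length len(ratings) (kept as char lists; "".join of the product tuple)
  let combos : List (List Char) := pyProduct01 ratings.length
  -- keep those with '00' not in c, converted by map(int, list(c))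
  let combos2 : List (List Int) :=
    (combos.filter (fun c => !(PySem.Chars.isIn ['0', '0'] c))).map (fun c => c.map pyIntChar)
  -- options = [zip(combo, ratings) for combo in combos]
  let options : List (List (Int × Int)) := combos2.map (fun combo => combo.zip ratings)
  -- computeOutcome: sum of i[0]*i[1]
  let outcomes : List Int := options.map (fun option => (option.map (fun i => i.1 * i.2)).sum)
  -- max(outcomes); outcomes is provably nonempty (the all-ones mask always survives the filter), so .getD 0 is never the result
  (PySem.List.max? outcomes (fun x => x)).getD 0

-- ===== PORT B =====
def maximizeRatings_alt (ratings : List Int) : Int :=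
  let ts := ratings.foldl (fun (ts : Int × Int) r => (max ts.1 ts.2 + r, ts.1)) (0, 0)
  max ts.1 ts.2

-- ===== PRECONDITION & SPEC =====
def Spec_maximizeRatings (ratings : List Int) (out : Int) : Prop := out = maximizeRatings_alt ratings
instance (ratings : List Int) (out : Int) : Decidable (Spec_maximizeRatings ratings out) := by unfold Spec_maximizeRatings; infer_instance

-- ===== CLAIM (what is proved, stated in full; the proofs are below) =====
def Claim_equal_maximizeRatings : Prop := ∀ (ratings : List Int), Dom_maximizeRatings ratings → Spec_maximizeRatings ratings (maximizeRatings ratings)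

-- ===== LEMMAS AND PROOFS =====

-- reference recursion: best additional sum over xs given whether the previous element was skipped
def fBest : Bool → List Int → Int
  | _, [] => 0
  | true, x :: xs => x + fBest false xs
  | false, x :: xs => max (x + fBest false xs) (fBest true xs)

-- mask validity: no '0' directly after a '0' (prev = previous char was '0')
def validMask : Bool → List Char → Bool
  | _, [] => true
  | prev, c :: cs => if c = '0' then (!prev && validMask true cs) else validMask false cs

-- value of a mask applied to the ratings, exactly as A computes it
def dotv (m : List Char) (xs : List Int) : Int :=
  (((m.map pyIntChar).zip xs).map (fun i => i.1 * i.2)).sum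

theorem infix_OO_iff (c : List Char) : (['0', '0'] <:+: c) ↔ validMask false c = false := by
  induction c with
  | nil => simp [validMask]
  | cons a t ih =>
    rw [List.infix_cons_iff]
    cases t with
    | nil =>
      simp [validMask]
    | cons b t' =>
      constructor
      · rintro (hp | hi)
        · rcases hp with ⟨s, hs⟩
          simp at hs
          obtain ⟨rfl, rfl, -⟩ := hs
          simp [validMask]
        · have := ih.mp hi
          by_cases hb : b = '0' <;> by_cases ha : a = '0' <;>
            simp [validMask, ha, hb] at this ⊢ <;> simp_all [validMask]
      · intro h
        by_cases ha : a = '0'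
        · by_cases hb : b = '0'
          · left; subst ha hb; exact ⟨t', by simp⟩
          · right; exact ih.mpr (by simpa [validMask, ha, hb] using h)
        · right; exact ih.mpr (by simpa [validMask, ha] using h)

theorem pyIntChar_zero : pyIntChar '0' = 0 := by decide
theorem pyIntChar_one : pyIntChar '1' = 1 := by decide

theorem dotv_zero_cons (m : List Char) (x : Int) (xs : List Int) :
    dotv ('0' :: m) (x :: xs) = dotv m xs := by
  simp [dotv, pyIntChar_zero]

theorem dotv_one_cons (m : List Char) (x : Int) (xs : List Int) :
    dotv ('1' :: m) (x :: xs) = x + dotv m xs := by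
  simp [dotv, pyIntChar_one]

theorem pyProduct01_succ (n : Nat) :
    pyProduct01 (n+1) =
      ((pyProduct01 n).map (fun r => '0' :: r)) ++ ((pyProduct01 n).map (fun r => '1' :: r)) := by
  have h : "01".toList = ['0', '1'] := by decide
  simp [pyProduct01, h]

-- every value fBest prev xs is achieved by some valid mask in the product list
theorem exists_best (xs : List Int) (prev : Bool) :
    ∃ m ∈ pyProduct01 xs.length, validMask prev m = true ∧ dotv m xs = fBest prev xs := by
  induction xs generalizing prev with
  | nil => exact ⟨[], by simp [pyProduct01], by simp [validMask], by simp [dotv, fBest]⟩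
  | cons x xs ih =>
    obtain ⟨mf, hmf, hvf, hdf⟩ := ih false
    obtain ⟨mt, hmt, hvt, hdt⟩ := ih true
    cases prev with
    | true =>
      refine ⟨'1' :: mf, ?_, ?_, ?_⟩
      · rw [List.length_cons, pyProduct01_succ]
        exact List.mem_append_right _ (List.mem_map_of_mem hmf)
      · simpa [validMask] using hvf
      · simp [dotv_one_cons, hdf, fBest]
    | false =>
      rcases le_total (fBest true xs) (x + fBest false xs) with h | h
      · refine ⟨'1' :: mf, ?_, ?_, ?_⟩
        · rw [List.length_cons, pyProduct01_succ]
          exact List.mem_append_right _ (List.mem_map_of_mem hmf)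
        · simpa [validMask] using hvf
        · simp only [dotv_one_cons, hdf, fBest]
          omega
      · refine ⟨'0' :: mt, ?_, ?_, ?_⟩
        · rw [List.length_cons, pyProduct01_succ]
          exact List.mem_append_left _ (List.mem_map_of_mem hmt)
        · simpa [validMask] using hvt
        · simp only [dotv_zero_cons, hdt, fBest]
          omega

theorem fBest_true_le_false (xs : List Int) : fBest true xs ≤ fBest false xs := by
  cases xs with
  | nil => simp [fBest]
  | cons x xs => simp only [fBest]; omega

-- every valid mask's value is bounded by fBest prev xs
theorem dotv_le_fBest (xs : List Int) :
    ∀ (prev : Bool) (m : List Char), m ∈ pyProduct01 xs.length → validMask prev m = true →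
      dotv m xs ≤ fBest prev xs := by
  induction xs with
  | nil =>
    intro prev m hm _
    simp [pyProduct01] at hm
    subst hm
    cases prev <;> simp [dotv, fBest]
  | cons x xs ih =>
    intro prev m hm hv
    rw [List.length_cons, pyProduct01_succ, List.mem_append] at hm
    rcases hm with hm | hm <;> obtain ⟨m', hm', rfl⟩ := List.mem_map.mp hm
    · -- m = '0' :: m'
      have hp : prev = false := by
        cases prev
        · rfl
        · simp [validMask] at hv
      have hv' : validMask true m' = true := by
        simpa [validMask, hp] using hv
      have hle := ih true m' hm' hv'
      subst hp
      rw [dotv_zero_cons]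
      calc dotv m' xs ≤ fBest true xs := hle
        _ ≤ fBest false (x :: xs) := by simp only [fBest]; omega
    · -- m = '1' :: m'
      have hv' : validMask false m' = true := by
        simpa [validMask] using hv
      have hle := ih false m' hm' hv'
      cases prev with
      | true => simp only [dotv_one_cons, fBest]; omega
      | false => simp only [dotv_one_cons, fBest]; omega

-- Python max of a list with a known member that bounds everything
theorem max?_eq_of_bound (l : List Int) (v : Int) (h1 : v ∈ l) (h2 : ∀ y ∈ l, y ≤ v) :
    PySem.List.max? l (fun x => x) = some v := by
  cases hm : PySem.List.max? l (fun x => x) with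
  | none =>
    rw [PySem.List.max?_eq_none_iff] at hm
    subst hm
    simp at h1
  | some m =>
    have hmem : m ∈ l := PySem.List.max?_mem hm
    have h3 : v ≤ m := PySem.List.max?_isMax hm v h1
    have h4 : m ≤ v := h2 m hmem
    exact congrArg some (le_antisymm h4 h3)

-- the filter predicate of A is exactly validMask false
theorem filter_pred_eq (c : List Char) :
    (!(PySem.Chars.isIn ['0', '0'] c)) = validMask false c := by
  cases h : PySem.Chars.isIn ['0', '0'] c with
  | true =>
    have hvm := (infix_OO_iff c).mp ((PySem.Chars.isIn_iff_infix _ _).mp h)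
    simp [hvm]
  | false =>
    have hni := (PySem.Chars.isIn_eq_false_iff _ _).mp h
    cases hvm : validMask false c with
    | true => rfl
    | false => exact absurd ((infix_OO_iff c).mpr hvm) hni

theorem portA_eq_fBest (ratings : List Int) : maximizeRatings ratings = fBest false ratings := by
  have hA : maximizeRatings ratings =
      (PySem.List.max?
        (((((pyProduct01 ratings.length).filter (fun c => !(PySem.Chars.isIn ['0', '0'] c))).map
            (fun c => c.map pyIntChar)).map (fun combo => combo.zip ratings)).map
          (fun option => (option.map (fun i => i.1 * i.2)).sum)) (fun x => x)).getD 0 := rfl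
  rw [hA]
  have hfilter : (pyProduct01 ratings.length).filter (fun c => !(PySem.Chars.isIn ['0', '0'] c))
      = (pyProduct01 ratings.length).filter (fun c => validMask false c) :=
    List.filter_congr (fun c _ => by rw [filter_pred_eq])
  rw [hfilter]
  rw [List.map_map, List.map_map]
  have hmaps : (((fun option => (List.map (fun i => i.1 * i.2) option).sum) ∘
        (fun combo => combo.zip ratings)) ∘ (fun c => List.map pyIntChar c))
      = fun c => dotv c ratings := by
    funext c
    simp [dotv, Function.comp]
  rw [hmaps]
  obtain ⟨m, hm, hv, hd⟩ := exists_best ratings false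
  have h1 : fBest false ratings ∈
      ((pyProduct01 ratings.length).filter (fun c => validMask false c)).map
        (fun c => dotv c ratings) :=
    List.mem_map.mpr ⟨m, List.mem_filter.mpr ⟨hm, hv⟩, hd⟩
  have h2 : ∀ y ∈ ((pyProduct01 ratings.length).filter (fun c => validMask false c)).map
        (fun c => dotv c ratings), y ≤ fBest false ratings := by
    intro y hy
    obtain ⟨m', hm', rfl⟩ := List.mem_map.mp hy
    obtain ⟨hmem, hvm⟩ := List.mem_filter.mp hm'
    exact dotv_le_fBest ratings false m' hmem hvm
  rw [max?_eq_of_bound _ _ h1 h2]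
  rfl

-- the DP fold continues any (take, skip) state by the best completion
theorem foldl_dp (xs : List Int) :
    ∀ t s : Int,
      (max (xs.foldl (fun (ts : Int × Int) r => (max ts.1 ts.2 + r, ts.1)) (t, s)).1
           (xs.foldl (fun (ts : Int × Int) r => (max ts.1 ts.2 + r, ts.1)) (t, s)).2)
        = max (t + fBest false xs) (s + fBest true xs) := by
  induction xs with
  | nil => intro t s; simp [fBest]
  | cons x xs ih =>
    intro t s
    simp only [List.foldl_cons]
    rw [ih (max t s + x) t]
    simp only [fBest]
    rcases le_total t s with h | h <;>
      rcases le_total (x + fBest false xs) (fBest true xs) with h2 | h2 <;>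
      simp only [max_def] <;> split_ifs <;> omega

theorem portB_eq_fBest (ratings : List Int) : maximizeRatings_alt ratings = fBest false ratings := by
  unfold maximizeRatings_alt
  rw [foldl_dp ratings 0 0]
  have h := fBest_true_le_false ratings
  omega

-- ===== VERDICT (by name: the statement is the Claim_ definition above) =====
theorem maximizeRatings_spec : Claim_equal_maximizeRatings := by
  intro ratings _
  unfold Spec_maximizeRatings
  rw [portA_eq_fBest, portB_eq_fBest]
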